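-- pv_equiv track=rewrite | github.com/SergeantWiley/pyDNA | libary.py | encode_DNA
-- ===== SOURCE A (Python) =====
-- dna_index = {
--     'AAA': 'if', 'AAT': 'elif', 'ATA': 'else',
--     'TTT': 'global_o2', 'TTA': 'global_co2', 'TAT': 'plant_pop', 'TAC': 'animal_pop',
--     'CCC': '>', 'CCA': '<', 'CAA': '=', 'CAT': '==', 'CAC': '>=', 'CAG': '<=',
--     'CCT': '+', 'CTA': '-', 'CTT': '*', 'CTC': '/', 'CTG': '%', 'CCG': '**', 'CGA': '//',
--     'GGG': '0', 'GGA': '1', 'GAA': '2', 'GAT': '3', 'GAC': '4', 'GAG': '5', 'GGT': '6',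
--     'GTA': '7', 'GTT': '8', 'GTC': '9', 'UUU': ':', 'UUA': '(', 'UUT': ')', 'UUC': '\n', 'UUG': '\t',
--     'UAU': '"', 'UAA': ' '
-- }
--
-- def encode_DNA(python_code):
--     dna_sequence = ""
--     i = 0
--     while i < len(python_code):
--         found = False
--         for key, value in dna_index.items():
--             if python_code[i:i+len(value)] == value:
--                 dna_sequence += key
--                 i += len(value)
--                 found = True
--                 break
--         if not found:
--             i += 1
--
--     return dna_sequence
-- ===== SOURCE B (Python) =====
-- dna_index = {
--     'AAA': 'if', 'AAT': 'elif', 'ATA': 'else',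
--     'TTT': 'global_o2', 'TTA': 'global_co2', 'TAT': 'plant_pop', 'TAC': 'animal_pop',
--     'CCC': '>', 'CCA': '<', 'CAA': '=', 'CAT': '==', 'CAC': '>=', 'CAG': '<=',
--     'CCT': '+', 'CTA': '-', 'CTT': '*', 'CTC': '/', 'CTG': '%', 'CCG': '**', 'CGA': '//',
--     'GGG': '0', 'GGA': '1', 'GAA': '2', 'GAT': '3', 'GAC': '4', 'GAG': '5', 'GGT': '6',
--     'GTA': '7', 'GTT': '8', 'GTC': '9', 'UUU': ':', 'UUA': '(', 'UUT': ')', 'UUC': '\n', 'UUG': '\t',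
--     'UAU': '"', 'UAA': ' '
-- }
--
-- # Index built once: first character of each value -> ordered list of (value, key),
-- # preserving dna_index insertion order within each bucket.
-- _pairs = [(v[0], (v, k)) for k, v in dna_index.items()]
-- _buckets = {}
-- for _c, _vk in _pairs:
--     _buckets[_c] = _buckets.get(_c, []) + [_vk]
--
--
-- def encode_DNA(python_code):
--     keys = []
--     i = 0
--     n = len(python_code)
--     while i < n:
--         for value, key in _buckets.get(python_code[i], []):
--             if python_code.startswith(value, i):
--                 keys.append(key)
--                 i += len(value)
--                 break
--         else:
--             i += 1
--     return ''.join(keys)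
-- ===== Notes on version B (the rewrite author's own statement) =====
-- stated objective: faster
-- what changed: Replaces the per-position scan of all 36 dict entries by a lookup in a first-character bucket index built once (insertion order preserved per bucket), and accumulates matched keys in a list joined at the end instead of repeated string concatenation.
import Mathlib
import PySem

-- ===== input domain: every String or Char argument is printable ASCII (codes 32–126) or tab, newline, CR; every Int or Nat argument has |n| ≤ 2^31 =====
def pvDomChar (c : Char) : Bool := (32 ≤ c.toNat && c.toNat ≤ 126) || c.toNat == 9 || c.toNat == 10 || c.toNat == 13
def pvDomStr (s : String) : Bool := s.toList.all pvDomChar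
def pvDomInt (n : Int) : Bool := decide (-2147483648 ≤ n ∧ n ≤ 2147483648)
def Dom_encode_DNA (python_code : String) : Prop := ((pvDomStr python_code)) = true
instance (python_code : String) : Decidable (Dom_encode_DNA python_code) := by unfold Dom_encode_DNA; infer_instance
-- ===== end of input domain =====

-- B replaces A's per-position scan of the whole codon table by a first-character bucket
-- index built once, and joins a list of matched keys instead of concatenating strings
-- (measured faster; same greedy first-match-in-insertion-order semantics).

-- ===== PORT A =====
-- dna_index.items(), in declaration order (all keys are distinct): (key, value) pairs
def dnaIndex : List (String × String) :=
  [("AAA", "if"), ("AAT", "elif"), ("ATA", "else"),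
   ("TTT", "global_o2"), ("TTA", "global_co2"), ("TAT", "plant_pop"), ("TAC", "animal_pop"),
   ("CCC", ">"), ("CCA", "<"), ("CAA", "="), ("CAT", "=="), ("CAC", ">="), ("CAG", "<="),
   ("CCT", "+"), ("CTA", "-"), ("CTT", "*"), ("CTC", "/"), ("CTG", "%"), ("CCG", "**"), ("CGA", "//"),
   ("GGG", "0"), ("GGA", "1"), ("GAA", "2"), ("GAT", "3"), ("GAC", "4"), ("GAG", "5"), ("GGT", "6"),
   ("GTA", "7"), ("GTT", "8"), ("GTC", "9"), ("UUU", ":"), ("UUA", "("), ("UUT", ")"), ("UUC", "\n"), ("UUG", "\t"),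
   ("UAU", "\""), ("UAA", " ")]

-- the inner `for key, value in dna_index.items(): if python_code[i:i+len(value)] == value: … break`
def pvFindA (cs : List Char) (i : Nat) : Option (String × String) :=
  dnaIndex.find? (fun kv =>
    PySem.List.slice cs (some (i : Int)) (some ((i : Int) + (kv.2.length : Int))) == kv.2.toList)

-- every value in the table is nonempty (needed for termination of the while loop)
theorem pvFindA_len {cs : List Char} {i : Nat} {kv : String × String}
    (h : pvFindA cs i = some kv) : 1 ≤ kv.2.length := by
  have hmem := List.mem_of_find?_eq_some h
  have hall : ∀ kv ∈ dnaIndex, 1 ≤ kv.2.length := by decide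
  exact hall _ hmem

-- the while loop of A: index i, string accumulator
def pvLoopA (cs : List Char) (i : Nat) (acc : String) : String :=
  if _h : i < cs.length then
    match hf : pvFindA cs i with
    | some kv => pvLoopA cs (i + kv.2.length) (acc ++ kv.1)
    | none => pvLoopA cs (i + 1) acc
  else acc
termination_by cs.length - i
decreasing_by
  · have := pvFindA_len hf; omega
  · omega

def encode_DNA (python_code : String) : String :=
  pvLoopA python_code.toList 0 ""

-- ===== PORT B =====
-- _pairs = [(v[0], (v, k)) for k, v in dna_index.items()]   (every value is nonempty, so v[0] is its head)
def pvPairs : List (Char × (String × String)) :=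
  dnaIndex.map (fun kv => (kv.2.toList.headD ' ', (kv.2, kv.1)))

-- _buckets[c] = _buckets.get(c, []) + [vk]
def pvBuckets : PySem.Dict Char (List (String × String)) :=
  pvPairs.foldl (fun d p => d.modify p.1 [] (· ++ [p.2])) PySem.Dict.empty

set_option maxRecDepth 100000 in
theorem pvBuckets_getD (c : Char) :
    pvBuckets.getD c [] = (pvPairs.filter (fun p => p.1 == c)).map (·.2) := by
  unfold pvBuckets
  rw [PySem.Dict.getD_foldl_modify_append]
  simp [PySem.Dict.getD_empty]

set_option maxRecDepth 100000 in
theorem pvBuckets_len {c : Char} {vk : String × String}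
    (h : vk ∈ pvBuckets.getD c []) : 1 ≤ vk.1.length := by
  rw [pvBuckets_getD] at h
  simp only [List.mem_map, List.mem_filter] at h
  obtain ⟨p, ⟨hp, _⟩, hv⟩ := h
  have hall : ∀ p ∈ pvPairs, 1 ≤ p.2.1.length := by decide
  have := hall p hp
  rw [hv] at this; exact this

-- the inner `for value, key in _buckets.get(python_code[i], []): if python_code.startswith(value, i): … break`
def pvFindB (rest : List Char) (cands : List (String × String)) : Option (String × String) :=
  cands.find? (fun vk => vk.1.toList.isPrefixOf rest)

-- the while loop of B: index i, list of keys, joined at the end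
set_option maxRecDepth 100000 in
def pvLoopB (cs : List Char) (i : Nat) (keys : List String) : List String :=
  if h : i < cs.length then
    match hf : pvFindB (cs.drop i) (pvBuckets.getD cs[i] []) with
    | some vk => pvLoopB cs (i + vk.1.length) (keys ++ [vk.2])
    | none => pvLoopB cs (i + 1) keys
  else keys
termination_by cs.length - i
decreasing_by
  · have := pvBuckets_len (List.mem_of_find?_eq_some hf); omega
  · omega

def encode_DNA_alt (python_code : String) : String :=
  String.join (pvLoopB python_code.toList 0 [])

-- ===== PRECONDITION & SPEC =====
def Spec_encode_DNA (python_code : String) (out : String) : Prop := out = encode_DNA_alt python_code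
instance (python_code : String) (out : String) : Decidable (Spec_encode_DNA python_code out) := by unfold Spec_encode_DNA; infer_instance

-- ===== CLAIM (what is proved, stated in full; the proofs are below) =====
def Claim_equal_encode_DNA : Prop := ∀ (python_code : String), Dom_encode_DNA python_code → Spec_encode_DNA python_code (encode_DNA python_code)

-- ===== LEMMAS AND PROOFS =====

-- find? ignores filtered-out elements that cannot satisfy the predicate
theorem pv_find?_filter {α : Type} (l : List α) (p q : α → Bool)
    (h : ∀ x ∈ l, p x = true → q x = true) :
    (l.filter q).find? p = l.find? p := by
  induction l with
  | nil => rfl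
  | cons a t ih =>
    by_cases hq : q a = true
    · simp only [List.filter_cons, hq, if_true, List.find?_cons]
      cases hp : p a <;> simp_all
    · have hp : p a = false := by
        cases hpa : p a
        · rfl
        · exact absurd (h a (List.mem_cons_self) hpa) (by simp_all)
      simp only [List.filter_cons, hq, List.find?_cons, hp]
      exact ih (fun x hx => h x (List.mem_cons_of_mem a hx))

theorem pv_find?_congr {α : Type} (l : List α) (p q : α → Bool)
    (h : ∀ x ∈ l, p x = q x) : l.find? p = l.find? q := by
  induction l with
  | nil => rfl
  | cons a t ih =>
    have ha := h a List.mem_cons_self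
    simp only [List.find?_cons, ha]
    cases q a
    · exact ih (fun x hx => h x (List.mem_cons_of_mem a hx))
    · rfl

-- A's slice test equals prefix test on the remaining suffix
theorem pvFindA_eq (cs : List Char) (i : Nat) :
    pvFindA cs i = dnaIndex.find? (fun kv => kv.2.toList.isPrefixOf (cs.drop i)) := by
  unfold pvFindA
  apply pv_find?_congr
  intro kv _
  rw [PySem.List.slice_natCast_add]
  rw [Bool.eq_iff_iff]
  simp only [beq_iff_eq, List.isPrefixOf_iff_prefix]
  constructor
  · intro h
    rw [← h]
    exact List.take_prefix _ _
  · intro h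
    conv_rhs => rw [List.prefix_iff_eq_take.mp h]
    rw [String.length_toList]

-- the bucket search finds exactly what A's full-table search finds (swapped pair)
set_option maxRecDepth 100000 in
theorem pvFind_agree (cs : List Char) (i : Nat) (h : i < cs.length) :
    pvFindB (cs.drop i) (pvBuckets.getD cs[i] []) =
      (pvFindA cs i).map (fun kv => (kv.2, kv.1)) := by
  set c := cs[i] with hc
  have hrest : cs.drop i = c :: cs.drop (i + 1) := List.drop_eq_getElem_cons h
  unfold pvFindB
  rw [pvBuckets_getD, List.find?_map]
  rw [pv_find?_filter]
  · unfold pvPairs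
    rw [List.find?_map, pvFindA_eq, Option.map_map]
    rw [pv_find?_congr _ _ (fun kv : String × String => kv.2.toList.isPrefixOf (List.drop i cs)) (fun x _ => rfl)]
    congr 1
  · -- a candidate matching the suffix must start with c, hence lies in bucket c
    intro p hp hmatch
    have hall : ∀ p ∈ pvPairs, p.2.1.toList.headD ' ' = p.1 ∧ p.2.1.toList ≠ [] := by decide
    obtain ⟨hhead, hne⟩ := hall p hp
    simp only [Function.comp] at hmatch
    rw [List.isPrefixOf_iff_prefix] at hmatch
    rw [hrest] at hmatch
    simp only [beq_iff_eq]
    cases hv : p.2.1.toList with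
    | nil => exact absurd hv hne
    | cons d t =>
      rw [hv] at hmatch hhead
      have := List.cons_prefix_cons.mp hmatch
      simp only [List.headD_cons] at hhead
      rw [← hhead, this.1]

theorem pv_foldl_append (l : List String) : ∀ (a : String), l.foldl (· ++ ·) a = a ++ l.foldl (· ++ ·) "" := by
  induction l with
  | nil => intro a; simp
  | cons x t ih =>
    intro a
    simp only [List.foldl_cons]
    rw [ih (a ++ x), ih ("" ++ x)]
    simp [String.append_assoc]

theorem pv_join_cons (x : String) (l : List String) : String.join (x :: l) = x ++ String.join l := by
  simp only [String.join, List.foldl_cons]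
  rw [pv_foldl_append]
  simp

-- B's key accumulator factors out
set_option maxRecDepth 100000 in
theorem pvLoopB_acc (cs : List Char) (i : Nat) (keys : List String) :
    pvLoopB cs i keys = keys ++ pvLoopB cs i [] := by
  induction hn : cs.length - i using Nat.strong_induction_on generalizing i keys with
  | _ n ih =>
    by_cases h : i < cs.length
    · conv_lhs => rw [pvLoopB]
      conv_rhs => rw [pvLoopB]
      simp only [dif_pos h]
      cases hf : pvFindB (cs.drop i) (pvBuckets.getD cs[i] []) with
      | some vk =>
        simp only [List.nil_append]
        have hlen := pvBuckets_len (List.mem_of_find?_eq_some hf)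
        rw [ih (cs.length - (i + vk.1.length)) (by omega) _ _ rfl,
            ih (cs.length - (i + vk.1.length)) (by omega) _ [vk.2] rfl]
        simp
      | none =>
        simp only
        exact ih (cs.length - (i + 1)) (by omega) _ _ rfl
    · simp [pvLoopB, h]

-- main loop invariant: A's loop = accumulator ++ join of B's loop
set_option maxRecDepth 100000 in
theorem pvLoop_agree (cs : List Char) (i : Nat) (acc : String) :
    pvLoopA cs i acc = acc ++ String.join (pvLoopB cs i []) := by
  induction hn : cs.length - i using Nat.strong_induction_on generalizing i acc with
  | _ n ih =>
    by_cases h : i < cs.length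
    · rw [pvLoopA, pvLoopB, dif_pos h, dif_pos h]
      have hA := pvFind_agree cs i h
      cases hf : pvFindA cs i with
      | some kv =>
        rw [hf] at hA
        simp only [Option.map_some] at hA
        rw [hA]
        simp only
        have hlen := pvFindA_len hf
        rw [ih (cs.length - (i + kv.2.length)) (by omega) _ _ rfl]
        simp only [List.nil_append]
        rw [pvLoopB_acc cs (i + kv.2.length) [kv.1], List.singleton_append, pv_join_cons,
            String.append_assoc]
      | none =>
        rw [hf] at hA
        simp only [Option.map_none] at hA
        rw [hA]
        simp only
        exact ih (cs.length - (i + 1)) (by omega) _ _ rfl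
    · rw [pvLoopA, pvLoopB, dif_neg h, dif_neg h]
      simp [String.join]

-- ===== VERDICT (by name: the statement is the Claim_ definition above) =====
theorem encode_DNA_spec : Claim_equal_encode_DNA := by
  intro python_code _
  unfold Spec_encode_DNA encode_DNA encode_DNA_alt
  rw [pvLoop_agree]
  simp
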